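-- pv_equiv track=rewrite | github.com/NSoiffer/mathml-core | tables/operator-dictionary.py | toUnicodeRanges
-- ===== SOURCE A (Python) =====
-- def toHexa(character):
--     return "U+%04X" % character
--
-- def stringifyRange(unicodeRange):
--     if unicodeRange[0] == unicodeRange[1]:
--         return toHexa(unicodeRange[0])
--     else:
--         return "[%s, %s]" % (toHexa(unicodeRange[0]), toHexa(unicodeRange[1]))
--
-- def toUnicodeRanges(operators):
--     unicodeRange = None
--     ranges = []
--
--     for character in operators:
--         if not unicodeRange:
--             unicodeRange = character, character
--         else:
--             if unicodeRange[1] + 1 == character: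
--                 unicodeRange = unicodeRange[0], character
--             else:
--                 ranges.append(stringifyRange(unicodeRange))
--                 unicodeRange = character, character
--
--     if unicodeRange:
--         ranges.append(stringifyRange(unicodeRange))
--
--     return ranges
-- ===== SOURCE B (Python) =====
-- def toHexa(character):
--     return "U+%04X" % character
--
-- def stringifyRange(unicodeRange):
--     if unicodeRange[0] == unicodeRange[1]:
--         return toHexa(unicodeRange[0])
--     else:
--         return "[%s, %s]" % (toHexa(unicodeRange[0]), toHexa(unicodeRange[1]))
--
-- def toUnicodeRanges(operators):
--     ranges = []
--     n = len(operators)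
--     i = 0
--     while i < n:
--         # extend the run [i..j] as long as values stay consecutive
--         j = i
--         while j + 1 < n and operators[j + 1] == operators[j] + 1:
--             j += 1
--         ranges.append(stringifyRange((operators[i], operators[j])))
--         i = j + 1
--     return ranges
-- ===== Notes on version B (the rewrite author's own statement) =====
-- stated objective: alternative
-- what changed: Replaces the single loop carrying an Optional current-range accumulator with structural recursion: a helper consumes one maximal run of consecutive codes and returns its end plus the remainder, and the main function recurses on the remainder, consing one stringified range per run.
import Mathlib
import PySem

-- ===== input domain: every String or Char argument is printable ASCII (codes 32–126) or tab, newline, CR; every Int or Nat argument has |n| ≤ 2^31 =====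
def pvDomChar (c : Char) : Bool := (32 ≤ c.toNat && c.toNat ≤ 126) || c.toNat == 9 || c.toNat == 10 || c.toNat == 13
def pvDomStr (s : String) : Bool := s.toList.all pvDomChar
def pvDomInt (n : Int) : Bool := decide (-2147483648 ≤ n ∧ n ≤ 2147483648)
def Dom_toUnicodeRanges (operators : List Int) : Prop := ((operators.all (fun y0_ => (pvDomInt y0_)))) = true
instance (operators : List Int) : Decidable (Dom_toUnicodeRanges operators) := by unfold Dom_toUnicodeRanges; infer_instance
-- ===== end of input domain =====

-- B replaces A's Optional-accumulator loop with structural recursion over maximal runs (alternative decomposition, same cost); return values proved equal on all inputs.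


-- ===== PORT A =====
-- "U+%04X" % character : uppercase hex of |n|, zero-filled to total width 4 (the sign counts toward the width)
def toHexa (character : Int) : String :=
  let ds := (Nat.toDigits 16 character.natAbs).map Char.toUpper
  if character < 0 then
    String.ofList ('U' :: '+' :: '-' :: (List.replicate (3 - ds.length) '0' ++ ds))
  else
    String.ofList ('U' :: '+' :: (List.replicate (4 - ds.length) '0' ++ ds))

def stringifyRange (unicodeRange : Int × Int) : String :=
  if unicodeRange.1 == unicodeRange.2 then
    toHexa unicodeRange.1
  else
    "[" ++ toHexa unicodeRange.1 ++ ", " ++ toHexa unicodeRange.2 ++ "]"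

-- the for-loop of A, carrying (unicodeRange, ranges); 'not unicodeRange' is true only for None (a 2-tuple is always truthy)
def loopA (unicodeRange : Option (Int × Int)) (ranges : List String) : List Int → List String
  | [] =>
    match unicodeRange with
    | none => ranges
    | some r => ranges ++ [stringifyRange r]
  | character :: rest =>
    match unicodeRange with
    | none => loopA (some (character, character)) ranges rest
    | some (a, b) =>
      if b + 1 == character then
        loopA (some (a, character)) ranges rest
      else
        loopA (some (character, character)) (ranges ++ [stringifyRange (a, b)]) rest

def toUnicodeRanges (operators : List Int) : List String :=
  loopA none [] operators

-- ===== PORT B =====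
-- B's two while-loops both only consume the list left to right, so they are transcribed as
-- recursion over the remaining suffix (exact: index i/j only advances past processed elements).
-- inner while: extend the run while the next value is end + 1; returns (run end, remaining suffix)
def runB (e : Int) : List Int → Int × List Int
  | [] => (e, [])
  | c :: rest => if c == e + 1 then runB c rest else (e, c :: rest)

theorem runB_len (e : Int) (l : List Int) : (runB e l).2.length ≤ l.length := by
  induction l generalizing e with
  | nil => simp [runB]
  | cons c rest ih =>
    simp only [runB]
    split
    · exact le_trans (ih c) (Nat.le_succ _)
    · simp

-- outer while: take the next run start, close the run, append its string to ranges
def loopB (ranges : List String) : List Int → List String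
  | [] => ranges
  | start :: rest =>
    let p := runB start rest
    loopB (ranges ++ [stringifyRange (start, p.1)]) p.2
termination_by l => l.length
decreasing_by
  exact Nat.lt_succ_of_le (runB_len start rest)

def toUnicodeRanges_alt (operators : List Int) : List String :=
  loopB [] operators

-- ===== PRECONDITION & SPEC =====
def Spec_toUnicodeRanges (operators : List Int) (out : List String) : Prop := out = toUnicodeRanges_alt operators
instance (operators : List Int) (out : List String) : Decidable (Spec_toUnicodeRanges operators out) := by unfold Spec_toUnicodeRanges; infer_instance

-- ===== CLAIM (what is proved, stated in full; the proofs are below) =====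
def Claim_equal_toUnicodeRanges : Prop := ∀ (operators : List Int), Dom_toUnicodeRanges operators → Spec_toUnicodeRanges operators (toUnicodeRanges operators)

-- ===== LEMMAS AND PROOFS =====

-- invariant: A's loop with an open range (a, e) closes it at the end of the current run,
-- then continues exactly as B's outer loop on the remaining suffix
theorem loopA_loopB (l : List Int) : ∀ (a e : Int) (ranges : List String),
    loopA (some (a, e)) ranges l =
      loopB (ranges ++ [stringifyRange (a, (runB e l).1)]) (runB e l).2 := by
  induction l with
  | nil => intro a e ranges; simp [loopA, runB, loopB]
  | cons c rest ih =>
    intro a e ranges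
    simp only [loopA, runB]
    by_cases h : c = e + 1
    · have hb : (e + 1 == c) = true := by simp [h]
      have hc : (c == e + 1) = true := by simp [h]
      rw [hb, hc]
      simp only [if_true]
      exact ih a c ranges
    · have hb : (e + 1 == c) = false := by simp [Ne.symm h]
      have hc : (c == e + 1) = false := by simp [h]
      rw [hb, hc]
      simp only [Bool.false_eq_true, if_false]
      rw [ih c c (ranges ++ [stringifyRange (a, e)]), loopB]

-- ===== VERDICT (by name: the statement is the Claim_ definition above) =====
theorem toUnicodeRanges_spec : Claim_equal_toUnicodeRanges := by
  intro operators _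
  show toUnicodeRanges operators = toUnicodeRanges_alt operators
  cases operators with
  | nil => simp [toUnicodeRanges, loopA, toUnicodeRanges_alt, loopB]
  | cons first rest =>
    show loopA (some (first, first)) [] rest = _
    rw [loopA_loopB rest first first []]
    simp [toUnicodeRanges_alt, loopB]
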